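-- pv_equiv track=rewrite | github.com/murilomonte/atv-tds | 3P/DOT/03-rev-listas-2/q10.py | calc_seq
-- ===== SOURCE A (Python) =====
-- def calc_seq(number_list: list[int]) -> int:
--     if type(number_list) != list:
--         return Exception
--
--     if len(number_list) < 2:
--         return Exception
--
--     for item in number_list:
--         if type(item) != int:
--             return Exception
--
--     global_sum: int = 0
--     internal_sum: int = 0
--     ocurrences: int = 0 ## Remover caso seja preciso considerar também números que não se repetem
--     for number in number_list:
--         internal_sum = 0
--         ocurrences = 0
--         for internal_number in number_list:
--             if number == internal_number:
--                 internal_sum += internal_number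
--                 ocurrences += 1
--             if internal_sum > global_sum and ocurrences > 1:
--                 global_sum = internal_sum
--     return global_sum
-- ===== SOURCE B (Python) =====
-- def calc_seq(number_list: list[int]) -> int:
--     if type(number_list) != list:
--         return Exception
--     if len(number_list) < 2:
--         return Exception
--     for item in number_list:
--         if type(item) != int:
--             return Exception
--     best = 0
--     cur = None
--     count = 0
--     for x in sorted(number_list):
--         if x == cur:
--             count += 1
--         else:
--             if count > 1 and cur * count > best:
--                 best = cur * count
--             cur = x
--             count = 1
--     if count > 1 and cur * count > best:
--         best = cur * count
--     return best
-- ===== Notes on version B (the rewrite author's own statement) =====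
-- stated objective: faster
-- what changed: Replaced A's quadratic nested scan (re-summing each value's occurrences for every element) by sorting a copy of the list and making one linear pass over runs of equal values, keeping the maximum value*count of runs longer than 1 with the same 0 floor.
import Mathlib
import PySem

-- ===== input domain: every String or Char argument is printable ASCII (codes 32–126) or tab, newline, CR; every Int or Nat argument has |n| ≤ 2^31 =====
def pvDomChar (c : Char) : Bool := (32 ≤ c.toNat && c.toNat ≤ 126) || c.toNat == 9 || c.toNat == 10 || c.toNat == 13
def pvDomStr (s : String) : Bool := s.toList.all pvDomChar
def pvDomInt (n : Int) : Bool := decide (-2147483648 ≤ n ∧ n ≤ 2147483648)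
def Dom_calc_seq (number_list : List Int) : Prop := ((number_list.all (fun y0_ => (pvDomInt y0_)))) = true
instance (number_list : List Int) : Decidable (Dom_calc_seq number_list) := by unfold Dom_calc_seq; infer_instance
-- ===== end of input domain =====

-- B sorts a copy of the list and finds the best value*count in one run-scan pass instead of A's nested quadratic scan; return-value equivalence proved on lists of length >= 2 (on shorter input A returns the class Exception, not an int).


-- ===== PORT A =====
-- body of A's inner 'for internal_number in number_list'; state = (global_sum, internal_sum, ocurrences)
def calcSeqInnerStep (number : Int) (st : Int × Int × Int) (internal_number : Int) : Int × Int × Int :=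
  let isum := if number == internal_number then st.2.1 + internal_number else st.2.1
  let occ  := if number == internal_number then st.2.2 + 1 else st.2.2
  ((if isum > st.1 ∧ occ > 1 then isum else st.1), isum, occ)

-- A's type/length validation is captured by Pre_calc_seq below (A returns the class Exception, not an int, when it fails)
def calc_seq (number_list : List Int) : Int :=
  number_list.foldl
    (fun global_sum number =>
      (number_list.foldl (calcSeqInnerStep number) (global_sum, 0, 0)).1)
    0

-- ===== PORT B =====
-- body of B's 'for x in sorted(number_list)'; state = (best, cur, count)
def calcSeqAltStep (st : Int × Option Int × Int) (x : Int) : Int × Option Int × Int :=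
  if some x == st.2.1 then (st.1, st.2.1, st.2.2 + 1)
  else
    ((if st.2.2 > 1 ∧ st.2.1.getD 0 * st.2.2 > st.1 then st.2.1.getD 0 * st.2.2 else st.1),
     some x, 1)

-- B's trailing 'if count > 1 and cur * count > best' after the loop
def calcSeqAltFlush (st : Int × Option Int × Int) : Int :=
  if st.2.2 > 1 ∧ st.2.1.getD 0 * st.2.2 > st.1 then st.2.1.getD 0 * st.2.2 else st.1

def calc_seq_alt (number_list : List Int) : Int :=
  calcSeqAltFlush
    ((PySem.List.sorted number_list (fun x => x) false).foldl calcSeqAltStep (0, none, 0))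

-- ===== PRECONDITION & SPEC =====
-- Pre_ excludes lists of length < 2, on which A (and B alike) return the class Exception instead of an int.
def Pre_calc_seq (number_list : List Int) : Prop := 2 ≤ number_list.length
instance (number_list : List Int) : Decidable (Pre_calc_seq number_list) := by unfold Pre_calc_seq; infer_instance
def pvWitness_calc_seq : List Int := [3, 3]

def Spec_calc_seq (number_list : List Int) (out : Int) : Prop := out = calc_seq_alt number_list
instance (number_list : List Int) (out : Int) : Decidable (Spec_calc_seq number_list out) := by unfold Spec_calc_seq; infer_instance

-- ===== CLAIM (what is proved, stated in full; the proofs are below) =====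
def Claim_equal_calc_seq : Prop := ∀ (number_list : List Int), Dom_calc_seq number_list → Pre_calc_seq number_list → Spec_calc_seq number_list (calc_seq number_list)

-- ===== LEMMAS AND PROOFS =====

lemma inner_char (v : Int) (ys : List Int) (gs occ : Int) (hgs : 0 ≤ gs) (hocc : 0 ≤ occ) :
    (ys.foldl (calcSeqInnerStep v) (gs, v * occ, occ)).1 =
      if ys ≠ [] ∧ 1 < occ + (ys.count v : Int) ∧ gs < v * (occ + (ys.count v : Int))
      then v * (occ + (ys.count v : Int)) else gs := by
  induction ys generalizing gs occ with
  | nil => simp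
  | cons y ys ih =>
    by_cases hy : y = v
    · subst hy
      have hmul : y * occ + y = y * (occ + 1) := by ring
      have hstep : calcSeqInnerStep y (gs, y * occ, occ) y =
          ((if y * (occ + 1) > gs ∧ occ + 1 > 1 then y * (occ + 1) else gs), y * (occ + 1), occ + 1) := by
        simp only [calcSeqInnerStep, BEq.rfl, if_true, hmul]
      rw [List.foldl_cons, hstep]
      set gs' := if y * (occ + 1) > gs ∧ occ + 1 > 1 then y * (occ + 1) else gs with hgs'
      have hgs'0 : 0 ≤ gs' := by
        rw [hgs']; split_ifs with h
        · exact le_trans hgs (le_of_lt h.1)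
        · exact hgs
      rw [ih gs' (occ + 1) hgs'0 (by linarith)]
      have hcount : ((y :: ys).count y : Int) = (ys.count y : Int) + 1 := by
        rw [List.count_cons_self]; push_cast; ring
      rw [hcount]
      set c := (ys.count y : Int) with hc
      have hc0 : 0 ≤ c := by positivity
      have hT : occ + 1 + c = occ + (c + 1) := by ring
      rw [hT]
      set T := occ + (c + 1) with hTd
      have hTocc : occ + 1 ≤ T := by omega
      by_cases hne : ys = []
      · subst hne
        have hc0' : c = 0 := by simp [hc]
        have hTeq : T = occ + 1 := by omega
        simp only [ne_eq, not_true_eq_false, false_and, if_false, reduceCtorEq, not_false_eq_true,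
          true_and]
        rw [hgs', hTeq]
        split_ifs with h1 h2 h2
        · rfl
        · exact absurd ⟨h1.2, h1.1⟩ h2
        · exact absurd ⟨h2.2, h2.1⟩ h1
        · rfl
      · simp only [hne, ne_eq, not_false_eq_true, true_and, reduceCtorEq]
        by_cases hup : y * (occ + 1) > gs ∧ occ + 1 > 1
        · have hy0 : 0 < y := by nlinarith [hup.1, hup.2]
          have hgse : gs' = y * (occ + 1) := by rw [hgs']; simp only [hup, and_self, if_true]
          have hle : y * (occ + 1) ≤ y * T := by nlinarith
          have h1T : 1 < T := by omega
          by_cases h2 : gs' < y * T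
          · rw [if_pos ⟨h1T, h2⟩, if_pos ⟨h1T, lt_of_lt_of_le hup.1 (by rw [← hgse]; exact le_of_lt h2)⟩]
          · have hyT : y * T = gs' := by
              rw [hgse]
              have hTle : T ≤ occ + 1 := by nlinarith [hgse ▸ not_lt.1 h2]
              have hTeq : T = occ + 1 := by omega
              rw [hTeq]
            rw [if_neg (fun hcon => absurd hcon.2 (by rw [hyT]; exact lt_irrefl _)),
              if_pos ⟨h1T, by rw [hyT, hgse]; exact hup.1⟩, hyT]
        · have hgse : gs' = gs := by rw [hgs']; simp only [hup, if_false]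
          rw [hgse]
    · have hbeq : (v == y) = false := by
        simp only [beq_eq_false_iff_ne, ne_eq]
        exact fun h => hy h.symm
      have hstep : calcSeqInnerStep v (gs, v * occ, occ) y =
          ((if v * occ > gs ∧ occ > 1 then v * occ else gs), v * occ, occ) := by
        simp only [calcSeqInnerStep, hbeq, Bool.false_eq_true, if_false]
      rw [List.foldl_cons, hstep]
      set gs' := if v * occ > gs ∧ occ > 1 then v * occ else gs with hgs'
      have hgs'0 : 0 ≤ gs' := by
        rw [hgs']; split_ifs with h
        · exact le_trans hgs (le_of_lt h.1)
        · exact hgs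
      rw [ih gs' occ hgs'0 hocc]
      have hcount : ((y :: ys).count v : Int) = (ys.count v : Int) := by
        rw [List.count_cons_of_ne hy]
      rw [hcount]
      set c := (ys.count v : Int) with hc
      have hc0 : 0 ≤ c := by positivity
      set T := occ + c with hTd
      have hTocc : occ ≤ T := by omega
      by_cases hne : ys = []
      · subst hne
        have hc0' : c = 0 := by simp [hc]
        have hTeq : T = occ := by omega
        simp only [ne_eq, not_true_eq_false, false_and, if_false, reduceCtorEq, not_false_eq_true,
          true_and]
        rw [hgs', hTeq]
        split_ifs with h1 h2 h2
        · rfl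
        · exact absurd ⟨h1.2, h1.1⟩ h2
        · exact absurd ⟨h2.2, h2.1⟩ h1
        · rfl
      · simp only [hne, ne_eq, not_false_eq_true, true_and, reduceCtorEq]
        by_cases hup : v * occ > gs ∧ occ > 1
        · have hy0 : 0 < v := by nlinarith [hup.1, hup.2]
          have hgse : gs' = v * occ := by rw [hgs']; simp only [hup, and_self, if_true]
          have hle : v * occ ≤ v * T := by nlinarith
          have h1T : 1 < T := by omega
          by_cases h2 : gs' < v * T
          · rw [if_pos ⟨h1T, h2⟩, if_pos ⟨h1T, lt_of_lt_of_le hup.1 (by rw [← hgse]; exact le_of_lt h2)⟩]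
          · have hyT : v * T = gs' := by
              rw [hgse]
              have hTle : T ≤ occ := by nlinarith [hgse ▸ not_lt.1 h2]
              have hTeq : T = occ := by omega
              rw [hTeq]
            rw [if_neg (fun hcon => absurd hcon.2 (by rw [hyT]; exact lt_irrefl _)),
              if_pos ⟨h1T, by rw [hyT, hgse]; exact hup.1⟩, hyT]
        · have hgse : gs' = gs := by rw [hgs']; simp only [hup, if_false]
          rw [hgse]



def pvG (v cnt : Int) : Int := if 1 < cnt then v * cnt else 0

def pvNN (v k : Int) : List Int → Int
  | [] => pvG v k
  | x :: s => if x = v then pvNN v (k + 1) s else max (pvG v k) (pvNN x 1 s)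

lemma update_eq_max (best v k : Int) (hb : 0 ≤ best) :
    (if k > 1 ∧ v * k > best then v * k else best) = max best (pvG v k) := by
  unfold pvG
  by_cases hk : 1 < k
  · by_cases hv : best < v * k
    · rw [if_pos ⟨hk, hv⟩, if_pos hk, max_eq_right (le_of_lt hv)]
    · rw [if_neg (fun h => hv h.2), if_pos hk, max_eq_left (not_lt.1 hv)]
  · rw [if_neg (fun h => hk h.1), if_neg hk, max_eq_left hb]

lemma alt_fold_char (s : List Int) (v k best : Int) (hb : 0 ≤ best) :
    calcSeqAltFlush (s.foldl calcSeqAltStep (best, some v, k)) = max best (pvNN v k s) := by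
  induction s generalizing v k best with
  | nil =>
    simp only [List.foldl_nil, calcSeqAltFlush, pvNN]
    exact update_eq_max best v k hb
  | cons x s ih =>
    rw [List.foldl_cons]
    by_cases hx : x = v
    · subst hx
      have hstep : calcSeqAltStep (best, some x, k) x = (best, some x, k + 1) := by
        simp [calcSeqAltStep]
      rw [hstep, ih x (k + 1) best hb]
      simp [pvNN]
    · have hstep : calcSeqAltStep (best, some v, k) x =
          ((if k > 1 ∧ v * k > best then v * k else best), some x, 1) := by
        simp [calcSeqAltStep, hx]
      rw [hstep, update_eq_max best v k hb,
        ih x 1 (max best (pvG v k)) (le_trans hb (le_max_left _ _))]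
      have hred : pvNN v k (x :: s) = max (pvG v k) (pvNN x 1 s) := by simp [pvNN, hx]
      rw [hred, max_assoc]

lemma pvNN_ub (v : Int) (s : List Int) (k : Int) (hs : (v :: s).Pairwise (· ≤ ·)) (hk : 1 ≤ k) :
    pvG v (k + (s.count v : Int)) ≤ max 0 (pvNN v k s) ∧
    ∀ x ∈ s, x ≠ v → pvG x ((s.count x : Int)) ≤ max 0 (pvNN v k s) := by
  induction s generalizing v k with
  | nil =>
    refine ⟨?_, by simp⟩
    simp only [List.count_nil, Nat.cast_zero, add_zero, pvNN]
    exact le_max_right 0 (pvG v k)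
  | cons y s ih =>
    rcases List.pairwise_cons.1 hs with ⟨hv, hys⟩
    by_cases hy : y = v
    · subst hy
      have hred : pvNN y k (y :: s) = pvNN y (k + 1) s := by simp [pvNN]
      obtain ⟨ih1, ih2⟩ := ih y (k + 1) hys (by linarith)
      constructor
      · have hc : ((y :: s).count y : Int) = (s.count y : Int) + 1 := by
          rw [List.count_cons_self]; push_cast; ring
        rw [hc, hred]
        have harr : k + ((s.count y : Int) + 1) = (k + 1) + (s.count y : Int) := by ring
        rw [harr]; exact ih1
      · intro x hx hxv
        have hx' : x ∈ s := by
          rcases List.mem_cons.1 hx with h | h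
          · exact absurd h hxv
          · exact h
        have hc : ((y :: s).count x : Int) = (s.count x : Int) := by
          rw [List.count_cons_of_ne (Ne.symm hxv)]
        rw [hc, hred]; exact ih2 x hx' hxv
    · have hyle : ∀ b ∈ s, y ≤ b := (List.pairwise_cons.1 hys).1
      have hvy : v < y := lt_of_le_of_ne (hv y List.mem_cons_self) (fun h => hy h.symm)
      have hred : pvNN v k (y :: s) = max (pvG v k) (pvNN y 1 s) := by simp [pvNN, hy]
      have hcv : ((y :: s).count v : Int) = 0 := by
        have h1 : v ∉ y :: s := by
          intro hmem
          rcases List.mem_cons.1 hmem with h | h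
          · exact hy h.symm
          · exact absurd (hyle v h) (not_le.2 hvy)
        simp [List.count_eq_zero_of_not_mem h1]
      obtain ⟨ihy1, ihy2⟩ := ih y 1 hys le_rfl
      constructor
      · rw [hcv, add_zero, hred]
        exact le_trans (le_max_left _ _) (le_max_right 0 _)
      · intro x hx hxv
        by_cases hxy : x = y
        · subst hxy
          have hc : ((x :: s).count x : Int) = (s.count x : Int) + 1 := by
            rw [List.count_cons_self]; push_cast; ring
          rw [hc, hred]
          have harr : (s.count x : Int) + 1 = 1 + (s.count x : Int) := by ring
          rw [harr]
          exact le_trans ihy1 (max_le_max le_rfl (le_max_right _ _))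
        · have hx' : x ∈ s := by
            rcases List.mem_cons.1 hx with h | h
            · exact absurd h hxy
            · exact h
          have hc : ((y :: s).count x : Int) = (s.count x : Int) := by
            rw [List.count_cons_of_ne (Ne.symm hxy)]
          rw [hc, hred]
          exact le_trans (ihy2 x hx' hxy) (max_le_max le_rfl (le_max_right _ _))

lemma pvNN_attain (v : Int) (s : List Int) (k : Int) (hs : (v :: s).Pairwise (· ≤ ·)) :
    pvNN v k s ≤ 0 ∨ pvNN v k s = pvG v (k + (s.count v : Int)) ∨
      ∃ x ∈ s, x ≠ v ∧ pvNN v k s = pvG x ((s.count x : Int)) := by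
  induction s generalizing v k with
  | nil => right; left; simp [pvNN]
  | cons y s ih =>
    rcases List.pairwise_cons.1 hs with ⟨hv, hys⟩
    by_cases hy : y = v
    · subst hy
      have hred : pvNN y k (y :: s) = pvNN y (k + 1) s := by simp [pvNN]
      have hc : ((y :: s).count y : Int) = (s.count y : Int) + 1 := by
        rw [List.count_cons_self]; push_cast; ring
      rcases ih y (k + 1) hys with h | h | ⟨x, hx, hxv, he⟩
      · left; rw [hred]; exact h
      · right; left
        rw [hred, hc, h]
        have harr : (k + 1) + (s.count y : Int) = k + ((s.count y : Int) + 1) := by ring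
        rw [harr]
      · right; right
        refine ⟨x, List.mem_cons_of_mem _ hx, hxv, ?_⟩
        have hcx : ((y :: s).count x : Int) = (s.count x : Int) := by
          rw [List.count_cons_of_ne (Ne.symm hxv)]
        rw [hred, hcx]; exact he
    · have hyle : ∀ b ∈ s, y ≤ b := (List.pairwise_cons.1 hys).1
      have hvy : v < y := lt_of_le_of_ne (hv y List.mem_cons_self) (fun h => hy h.symm)
      have hred : pvNN v k (y :: s) = max (pvG v k) (pvNN y 1 s) := by simp [pvNN, hy]
      have hcv : ((y :: s).count v : Int) = 0 := by
        have h1 : v ∉ y :: s := by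
          intro hmem
          rcases List.mem_cons.1 hmem with h | h
          · exact hy h.symm
          · exact absurd (hyle v h) (not_le.2 hvy)
        simp [List.count_eq_zero_of_not_mem h1]
      rcases max_choice (pvG v k) (pvNN y 1 s) with hmx | hmx
      · right; left; rw [hred, hmx, hcv, add_zero]
      · rcases ih y 1 hys with h | h | ⟨x, hx, hxy, he⟩
        · left; rw [hred, hmx]; exact h
        · right; right
          refine ⟨y, List.mem_cons_self, hy, ?_⟩
          have hcy : ((y :: s).count y : Int) = (s.count y : Int) + 1 := by
            rw [List.count_cons_self]; push_cast; ring
          rw [hred, hmx, hcy, h]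
          have harr : 1 + (s.count y : Int) = (s.count y : Int) + 1 := by ring
          rw [harr]
        · right; right
          have hxv : x ≠ v := by
            intro h; subst h
            exact absurd (hyle x hx) (not_le.2 hvy)
          refine ⟨x, List.mem_cons_of_mem _ hx, hxv, ?_⟩
          have hcx : ((y :: s).count x : Int) = (s.count x : Int) := by
            rw [List.count_cons_of_ne (Ne.symm hxy)]
          rw [hred, hmx, hcx]; exact he

def pvF (l : List Int) (v : Int) : Int := pvG v (l.count v)

def pvN (l : List Int) (m : List Int) : Int := m.foldr (fun v acc => max (pvF l v) acc) 0



lemma pvN_nonneg (l m : List Int) : 0 ≤ pvN l m := by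
  induction m with
  | nil => simp [pvN]
  | cons v m ih => simp only [pvN, List.foldr] at *; exact le_max_of_le_right ih

lemma pvN_ub (l : List Int) (m : List Int) : ∀ v ∈ m, pvF l v ≤ pvN l m := by
  induction m with
  | nil => simp
  | cons w m ih =>
    intro v hv
    rcases List.mem_cons.1 hv with h | h
    · subst h; exact le_max_left _ _
    · exact le_trans (ih v h) (le_max_right _ _)

lemma pvN_attain (l : List Int) (m : List Int) :
    pvN l m = 0 ∨ ∃ v ∈ m, pvN l m = pvF l v := by
  induction m with
  | nil => left; rfl
  | cons w m ih =>
    have h : pvN l (w :: m) = max (pvF l w) (pvN l m) := rfl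
    rcases max_choice (pvF l w) (pvN l m) with hc | hc
    · right; exact ⟨w, List.mem_cons_self, by rw [h, hc]⟩
    · rcases ih with h0 | ⟨v, hv, he⟩
      · left; rw [h, hc, h0]
      · right; exact ⟨v, List.mem_cons_of_mem _ hv, by rw [h, hc, he]⟩

lemma outer_char (l : List Int) (m : List Int) (a : Int) (hm : ∀ v ∈ m, v ∈ l) (ha : 0 ≤ a) :
    m.foldl (fun gs v => (l.foldl (calcSeqInnerStep v) (gs, 0, 0)).1) a = max a (pvN l m) := by
  induction m generalizing a with
  | nil => simp only [List.foldl_nil, pvN, List.foldr_nil]; exact (max_eq_left ha).symm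
  | cons v m ih =>
    rw [List.foldl_cons]
    have h0 : (l.foldl (calcSeqInnerStep v) (a, 0, 0)).1 = max a (pvF l v) := by
      have hi := inner_char v l a 0 ha le_rfl
      rw [mul_zero] at hi
      rw [hi]
      have hvl : v ∈ l := hm v List.mem_cons_self
      have hlne : l ≠ [] := List.ne_nil_of_mem hvl
      simp only [zero_add]
      unfold pvF pvG
      by_cases hc : 1 < (l.count v : Int)
      · by_cases hav : a < v * (l.count v : Int)
        · rw [if_pos ⟨hlne, hc, hav⟩, if_pos hc, max_eq_right (le_of_lt hav)]
        · rw [if_neg (fun h => hav h.2.2), if_pos hc, max_eq_left (not_lt.1 hav)]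
      · rw [if_neg (fun h => hc h.2.1), if_neg hc, max_eq_left ha]
    rw [h0, ih (max a (pvF l v)) (fun w hw => hm w (List.mem_cons_of_mem _ hw))
      (le_trans ha (le_max_left _ _))]
    have hN : pvN l (v :: m) = max (pvF l v) (pvN l m) := rfl
    rw [hN, max_assoc]

lemma calc_seq_eq_pvN (l : List Int) : calc_seq l = pvN l l := by
  have h := outer_char l l 0 (fun _ h => h) le_rfl
  unfold calc_seq
  rw [h, max_eq_right (pvN_nonneg l l)]

lemma calc_seq_alt_eq_pvN (l : List Int) : calc_seq_alt l = pvN l l := by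
  rcases hs : PySem.List.sorted l (fun x => x) false with _ | ⟨x, t⟩
  · have hl : l = [] := by
      have := PySem.List.sorted_eq_nil_iff (xs := l) (key := fun x => x) (rev := false)
      exact this.1 hs
    subst hl
    rfl
  · have hperm : (x :: t).Perm l := by
      have := PySem.List.sorted_perm (xs := l) (key := fun x => x) (rev := false)
      rw [hs] at this; exact this
    have hpw : (x :: t).Pairwise (· ≤ ·) := by
      have := PySem.List.sorted_pairwise (xs := l) (key := fun x => x)
      rw [hs] at this; exact this
    have hcnt : ∀ w : Int, (l.count w : Int) = ((x :: t).count w : Int) := by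
      intro w; rw [hperm.count_eq]
    have hmem : ∀ w : Int, w ∈ (x :: t) ↔ w ∈ l := fun w => hperm.mem_iff
    unfold calc_seq_alt
    rw [hs, List.foldl_cons]
    have hstep1 : calcSeqAltStep (0, none, 0) x = (0, some x, 1) := by
      simp [calcSeqAltStep]
    rw [hstep1, alt_fold_char t x 1 0 le_rfl]
    apply le_antisymm
    · apply max_le (pvN_nonneg l l)
      rcases pvNN_attain x t 1 hpw with h | h | ⟨w, hw, hwx, he⟩
      · exact le_trans h (pvN_nonneg l l)
      · rw [h]
        have hxc : (1 : Int) + (t.count x : Int) = ((x :: t).count x : Int) := by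
          rw [List.count_cons_self]; push_cast; ring
        rw [hxc, ← hcnt x]
        exact pvN_ub l l x ((hmem x).1 List.mem_cons_self)
      · rw [he]
        have hwc : ((t.count w : Nat) : Int) = ((x :: t).count w : Int) := by
          rw [List.count_cons_of_ne (Ne.symm hwx)]
        rw [hwc, ← hcnt w]
        exact pvN_ub l l w ((hmem w).1 (List.mem_cons_of_mem _ hw))
    · rcases pvN_attain l l with h | ⟨w, hw, he⟩
      · rw [h]; exact le_max_left _ _
      · rw [he]
        unfold pvF
        rw [hcnt w]
        by_cases hwx : w = x
        · subst hwx
          have hxc : ((w :: t).count w : Int) = 1 + (t.count w : Int) := by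
            rw [List.count_cons_self]; push_cast; ring
          rw [hxc]
          exact (pvNN_ub w t 1 hpw le_rfl).1
        · have hwt : w ∈ t := by
            rcases List.mem_cons.1 ((hmem w).2 hw) with h' | h'
            · exact absurd h' hwx
            · exact h'
          have hwc : ((x :: t).count w : Int) = (t.count w : Int) := by
            rw [List.count_cons_of_ne (Ne.symm hwx)]
          rw [hwc]
          exact (pvNN_ub x t 1 hpw le_rfl).2 w hwt hwx

-- ===== VERDICT (by name: the statement is the Claim_ definition above) =====
theorem calc_seq_spec : Claim_equal_calc_seq := by
  intro l _ _
  unfold Spec_calc_seq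
  rw [calc_seq_eq_pvN, calc_seq_alt_eq_pvN]
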